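-- pv_equiv track=rewrite | github.com/jaysen/py_play | katas/HackerRank/Tests/device_names.py | deviceNamesSystem2
-- ===== SOURCE A (Python) =====
-- def deviceNamesSystem2(devicenames):
--     # create a dict to store names and counts:
--     name_counts = {}
--     result = []
--
--     for device in devicenames:
--         if device not in name_counts:
--             # create a entry for the device and set its count to 1, then use the device name as is.
--             name_counts[device] = 0
--             result.append(device)
--         else:
--             # get the current count, add 1 to it, then append the count to the device name and use it in result
--             count = name_counts[device]
--             count = count + 1
--             name_counts[device] = count
--             name = device + str(count)
--             result.append(name)
--
--     return result
-- ===== SOURCE B (Python) =====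
-- def deviceNamesSystem2(devicenames):
--     # group-and-scatter: build each name's list of positions, then write the
--     # decorated names group by group into a preallocated output list
--     positions = {}
--     for i, device in enumerate(devicenames):
--         positions[device] = positions.get(device, []) + [i]
--     out = [""] * len(devicenames)
--     for device, idxs in positions.items():
--         out[idxs[0]] = device
--         for k, j in enumerate(idxs[1:], 1):
--             out[j] = device + str(k)
--     return out
-- ===== Notes on version B (the rewrite author's own statement) =====
-- stated objective: alternative
-- what changed: Replaces A's single left-to-right pass with a running name->count dict by a two-stage group-and-scatter: first group all indices by name into a positions dict, then preallocate the output and write each name's decorated occurrences group by group (out-of-order scatter instead of sequential append).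
import Mathlib
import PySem

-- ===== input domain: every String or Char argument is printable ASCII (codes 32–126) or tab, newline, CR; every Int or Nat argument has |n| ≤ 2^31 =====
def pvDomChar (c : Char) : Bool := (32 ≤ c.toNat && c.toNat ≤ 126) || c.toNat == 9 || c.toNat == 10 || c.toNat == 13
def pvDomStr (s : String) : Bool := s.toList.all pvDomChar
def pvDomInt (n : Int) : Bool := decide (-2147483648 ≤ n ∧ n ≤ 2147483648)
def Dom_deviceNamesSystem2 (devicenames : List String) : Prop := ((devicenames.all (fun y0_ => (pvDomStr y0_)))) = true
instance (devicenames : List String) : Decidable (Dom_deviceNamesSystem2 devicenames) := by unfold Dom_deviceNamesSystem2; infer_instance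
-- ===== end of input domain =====

-- B replaces A's single running name->count pass by a two-stage group-and-scatter:
-- group indices by name into a dict, then write decorated names group by group
-- into a preallocated output list (alternative algorithm, same asymptotic cost).


-- ===== PORT A =====
-- literal port of A: fold over the names keeping (name_counts dict, result list)
def deviceNamesSystem2 (devicenames : List String) : List String :=
  (devicenames.foldl (fun (st : PySem.Dict String Int × List String) device =>
    match st.1.get? device with
    | none => (st.1.insert device 0, st.2 ++ [device])
    | some count => (st.1.insert device (count + 1), st.2 ++ [device ++ PySem.Int.toStr (count + 1)])
  ) (PySem.Dict.empty, [])).2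

-- ===== PORT B =====
-- literal port of B: build the positions dict (positions[d] = positions.get(d, []) + [i]),
-- then fold over its items scattering each group into the preallocated output.
-- The '[] => out' branch of the match is a totality guard only: every stored list is nonempty.
def deviceNamesSystem2_alt (devicenames : List String) : List String :=
  let positions := (PySem.List.enumerate devicenames 0).foldl
      (fun dct p => dct.modify p.2 [] (fun l => l ++ [p.1])) PySem.Dict.empty
  positions.items.foldl (fun out p =>
    match p.2 with
    | [] => out
    | i0 :: rest =>
      (PySem.List.enumerate rest 1).foldl
        (fun o q => PySem.List.pySetD o q.2 (p.1 ++ PySem.Int.toStr q.1))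
        (PySem.List.pySetD out i0 p.1))
    (List.replicate devicenames.length "")

-- ===== PRECONDITION & SPEC =====
def Spec_deviceNamesSystem2 (devicenames : List String) (out : List String) : Prop := out = deviceNamesSystem2_alt devicenames
instance (devicenames : List String) (out : List String) : Decidable (Spec_deviceNamesSystem2 devicenames out) := by unfold Spec_deviceNamesSystem2; infer_instance

-- ===== CLAIM (what is proved, stated in full; the proofs are below) =====
def Claim_equal_deviceNamesSystem2 : Prop := ∀ (devicenames : List String), Dom_deviceNamesSystem2 devicenames → Spec_deviceNamesSystem2 devicenames (deviceNamesSystem2 devicenames)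

-- ===== LEMMAS AND PROOFS =====

def dec (d : String) (k : Nat) : String := if k = 0 then d else d ++ PySem.Int.toStr (k : Int)

def dnGo (pre rest : List String) : List String :=
  match rest with
  | [] => []
  | d :: rs => dec d (pre.count d) :: dnGo (pre ++ [d]) rs

lemma dnGo_a (rest : List String) : ∀ (pre : List String) (nc : PySem.Dict String Int) (res : List String),
    (∀ d, nc.get? d = if pre.count d = 0 then none else some ((pre.count d : Int) - 1)) →
    (rest.foldl (fun (st : PySem.Dict String Int × List String) device =>
      match st.1.get? device with
      | none => (st.1.insert device 0, st.2 ++ [device])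
      | some count => (st.1.insert device (count + 1), st.2 ++ [device ++ PySem.Int.toStr (count + 1)])
      ) (nc, res)).2 = res ++ dnGo pre rest := by
  induction rest with
  | nil => intro pre nc res _; simp [dnGo]
  | cons d rs ih =>
    intro pre nc res hinv
    simp only [List.foldl_cons, dnGo]
    by_cases hc : pre.count d = 0
    · have h0 : nc.get? d = none := by rw [hinv d, if_pos hc]
      simp only [h0]
      rw [ih (pre ++ [d]) _ _ ?_]
      · simp [dec, hc]
      · intro d'
        by_cases he : d' = d
        · subst he
          rw [PySem.Dict.get?_insert_self]
          simp [List.count_append, hc]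
        · rw [PySem.Dict.get?_insert_of_ne _ _ he, hinv d']
          have hne : ¬ d = d' := fun h => he h.symm
          simp [List.count_append, hne]
    · have h1 : nc.get? d = some ((pre.count d : Int) - 1) := by rw [hinv d, if_neg hc]
      simp only [h1]
      rw [ih (pre ++ [d]) _ _ ?_]
      · have : ((pre.count d : Int) - 1) + 1 = (pre.count d : Int) := by ring
        simp [dec, hc, this]
      · intro d'
        by_cases he : d' = d
        · subst he
          have h2 : (pre ++ [d']).count d' = pre.count d' + 1 := by simp [List.count_append]
          rw [PySem.Dict.get?_insert_self, h2, if_neg (by omega)]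
          congr 1
          push_cast
          ring
        · rw [PySem.Dict.get?_insert_of_ne _ _ he, hinv d']
          have hne : ¬ d = d' := fun h => he h.symm
          simp [List.count_append, hne]

lemma dnGo_length (rest : List String) : ∀ pre, (dnGo pre rest).length = rest.length := by
  induction rest with
  | nil => intro; simp [dnGo]
  | cons d rs ih => intro pre; simp [dnGo, ih]

lemma dnGo_getD (rest : List String) : ∀ (pre : List String) (i : Nat), i < rest.length →
    (dnGo pre rest).getD i "" = dec (rest.getD i "") ((pre ++ rest.take i).count (rest.getD i "")) := by
  induction rest with
  | nil => intro _ i h; simp at h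
  | cons d rs ih =>
    intro pre i hi
    cases i with
    | zero => simp [dnGo]
    | succ i =>
      simp only [dnGo, List.getD_cons_succ, List.take_succ_cons]
      rw [ih (pre ++ [d]) i (by simpa using hi)]
      simp [List.append_assoc]

def occ (xs : List String) (d : String) : List Nat :=
  match xs with
  | [] => []
  | x :: t => if x = d then 0 :: (occ t d).map (· + 1) else (occ t d).map (· + 1)

lemma occ_mem (xs : List String) (d : String) : ∀ m, m ∈ occ xs d ↔ m < xs.length ∧ xs.getD m "" = d := by
  induction xs with
  | nil => intro m; simp [occ]
  | cons x t ih =>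
    intro m
    by_cases hx : x = d
    · simp only [occ, if_pos hx]
      cases m with
      | zero => simp [hx]
      | succ m => simp [List.mem_map, ih m]
    · simp only [occ, if_neg hx]
      cases m with
      | zero => simp [List.mem_map, Ne.symm, hx]
      | succ m => simp [List.mem_map, ih m]

lemma occ_getElem? (xs : List String) (d : String) : ∀ (j m : Nat), (occ xs d)[j]? = some m →
    m < xs.length ∧ xs.getD m "" = d ∧ (xs.take m).count d = j := by
  induction xs with
  | nil => intro j m h; simp [occ] at h
  | cons x t ih =>
    intro j m h
    by_cases hx : x = d
    · rw [occ, if_pos hx] at h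
      cases j with
      | zero =>
        simp at h
        subst h
        simp [hx]
      | succ j =>
        simp only [List.getElem?_cons_succ, List.getElem?_map] at h
        cases hm : (occ t d)[j]? with
        | none => simp [hm] at h
        | some m' =>
          simp [hm] at h
          obtain ⟨h1, h2, h3⟩ := ih j m' hm
          subst h
          refine ⟨by simpa using h1, by simpa using h2, ?_⟩
          simp [List.take_succ_cons, hx, h3]
    · rw [occ, if_neg hx] at h
      simp only [List.getElem?_map] at h
      cases hm : (occ t d)[j]? with
      | none => simp [hm] at h
      | some m' =>
        simp [hm] at h
        obtain ⟨h1, h2, h3⟩ := ih j m' hm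
        subst h
        refine ⟨by simpa using h1, by simpa using h2, ?_⟩
        simp [List.take_succ_cons, hx, h3]


lemma shiftMap (l : List Nat) (s : Int) :
    l.map (fun m => Int.ofNat m + (s + 1)) = (l.map (· + 1)).map (fun m => Int.ofNat m + s) := by
  rw [List.map_map]
  apply List.map_congr_left
  intro m _
  simp only [Function.comp]
  simp only [Int.ofNat_eq_natCast]
  push_cast
  ring

lemma occ_filter (d : String) (xs : List String) : ∀ (s : Int),
    (((PySem.List.enumerate xs s).map Prod.swap).filter (fun q => q.1 == d)).map (·.2)
      = (occ xs d).map (fun m => Int.ofNat m + s) := by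
  induction xs with
  | nil => intro s; simp [PySem.List.enumerate_nil, occ]
  | cons x t ih =>
    intro s
    rw [PySem.List.enumerate_cons, List.map_cons, Prod.swap_prod_mk]
    by_cases hx : x = d
    · rw [List.filter_cons_of_pos (by simpa using hx), List.map_cons, ih (s + 1), shiftMap]
      simp [occ, hx]
    · rw [List.filter_cons_of_neg (by simpa using hx), ih (s + 1), shiftMap]
      simp [occ, hx]

def dnPositions (xs : List String) : PySem.Dict String (List Int) :=
  (PySem.List.enumerate xs 0).foldl
      (fun dct p => dct.modify p.2 [] (fun l => l ++ [p.1])) PySem.Dict.empty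

lemma dnPositions_getD (xs : List String) (d : String) :
    (dnPositions xs).getD d [] = (occ xs d).map (fun m => Int.ofNat m) := by
  have hfold : dnPositions xs
      = ((PySem.List.enumerate xs 0).map Prod.swap).foldl
          (fun dct q => dct.modify q.1 [] (fun l => l ++ [q.2])) PySem.Dict.empty := by
    rw [List.foldl_map]
    simp [dnPositions]
  rw [hfold, PySem.Dict.getD_foldl_modify_append, PySem.Dict.getD_empty]
  have := occ_filter d xs 0
  simpa using this

lemma dnPositions_keys (xs : List String) : (dnPositions xs).keys = PySem.Set.ofList xs := by
  unfold dnPositions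
  rw [PySem.Dict.keys_foldl_modify_key]
  simp [PySem.List.map_snd_enumerate, PySem.Set.update_nil_left]

lemma dnPositions_items (xs : List String) :
    (dnPositions xs).items
      = (PySem.Set.ofList xs).map (fun k => (k, (occ xs k).map (fun m => Int.ofNat m))) := by
  rw [PySem.Dict.items_eq_map_keys (dnPositions xs) ?hnd []]
  · rw [dnPositions_keys]
    exact List.map_congr_left (fun k _ => by rw [dnPositions_getD])
  · rw [dnPositions_keys]; exact PySem.Set.nodup_ofList xs

-- scatter of one group's tail: writes d ++ str(k+j) at position ms[j]
lemma tailFold (xs : List String) (d : String) : ∀ (ms : List Nat) (k : Nat) (out : List String),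
    1 ≤ k → out.length = xs.length →
    (∀ j m, ms[j]? = some m → m < xs.length ∧ xs.getD m "" = d ∧ (xs.take m).count d = k + j) →
    ((PySem.List.enumerate (ms.map (fun m => Int.ofNat m)) (Int.ofNat k)).foldl
        (fun o q => PySem.List.pySetD o q.2 (d ++ PySem.Int.toStr q.1)) out).length = xs.length ∧
    ∀ i : Nat,
      (i ∈ ms → ((PySem.List.enumerate (ms.map (fun m => Int.ofNat m)) (Int.ofNat k)).foldl
          (fun o q => PySem.List.pySetD o q.2 (d ++ PySem.Int.toStr q.1)) out).getD i ""
        = dec (xs.getD i "") ((xs.take i).count (xs.getD i ""))) ∧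
      (i ∉ ms → ((PySem.List.enumerate (ms.map (fun m => Int.ofNat m)) (Int.ofNat k)).foldl
          (fun o q => PySem.List.pySetD o q.2 (d ++ PySem.Int.toStr q.1)) out).getD i ""
        = out.getD i "") := by
  intro ms
  induction ms with
  | nil =>
    intro k out _ hlen _
    simp [PySem.List.enumerate_nil, hlen]
  | cons m0 ms ih =>
    intro k out hk hlen hspec
    rw [List.map_cons, PySem.List.enumerate_cons, List.foldl_cons]
    have h0 := hspec 0 m0 (by simp)
    have hm0 : m0 < out.length := by rw [hlen]; exact h0.1
    have hset : PySem.List.pySetD out (Int.ofNat m0) (d ++ PySem.Int.toStr (Int.ofNat k))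
        = out.set m0 (d ++ PySem.Int.toStr (Int.ofNat k)) := by
      simp [PySem.List.pySetD_natCast]
    have hcast : Int.ofNat k + 1 = Int.ofNat (k + 1) := by simp
    rw [hset, hcast]
    have ihres := ih (k + 1) (out.set m0 (d ++ PySem.Int.toStr (Int.ofNat k)))
      (by omega) (by simp [hlen])
      (fun j m hj => by
        have := hspec (j + 1) m (by simpa using hj)
        exact ⟨this.1, this.2.1, this.2.2.trans (by omega)⟩)
    refine ⟨ihres.1, fun i => ⟨fun hi => ?_, fun hi => ?_⟩⟩
    · by_cases hims : i ∈ ms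
      · exact (ihres.2 i).1 hims
      · have hi0 : i = m0 := by
          rcases List.mem_cons.mp hi with h | h
          · exact h
          · exact absurd h hims
        subst hi0
        rw [(ihres.2 i).2 hims]
        have hval : (out.set i (d ++ PySem.Int.toStr (Int.ofNat k))).getD i ""
            = d ++ PySem.Int.toStr (Int.ofNat k) := by
          rw [List.getD_eq_getElem?_getD, List.getElem?_set_self (by simpa using hm0)]
          rfl
        have hkne : k ≠ 0 := by omega
        rw [hval, h0.2.1, dec, h0.2.2]
        simp [hkne]
    · have hims : i ∉ ms := fun h => hi (List.mem_cons_of_mem _ h)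
      have hine : i ≠ m0 := fun h => hi (h ▸ List.mem_cons_self)
      rw [(ihres.2 i).2 hims, List.getD_eq_getElem?_getD,
        List.getElem?_set_ne (fun h => hine h.symm), ← List.getD_eq_getElem?_getD]

lemma occ_ne_nil (xs : List String) (k : String) (hk : k ∈ xs) : occ xs k ≠ [] := by
  obtain ⟨i, hi, hx⟩ := List.mem_iff_getElem.mp hk
  have : i ∈ occ xs k := (occ_mem xs k i).mpr ⟨hi, by rw [List.getD_eq_getElem _ _ hi, hx]⟩
  exact fun h => by simp [h] at this

lemma foldGroups (xs : List String) : ∀ (ks : List String) (out : List String),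
    out.length = xs.length → (∀ k ∈ ks, k ∈ xs) →
    (ks.foldl (fun out k =>
        match (occ xs k).map (fun m => Int.ofNat m) with
        | [] => out
        | i0 :: rest => (PySem.List.enumerate rest 1).foldl
            (fun o q => PySem.List.pySetD o q.2 (k ++ PySem.Int.toStr q.1))
            (PySem.List.pySetD out i0 k)) out).length = xs.length ∧
    ∀ i : Nat, i < xs.length →
      (ks.foldl (fun out k =>
        match (occ xs k).map (fun m => Int.ofNat m) with
        | [] => out
        | i0 :: rest => (PySem.List.enumerate rest 1).foldl
            (fun o q => PySem.List.pySetD o q.2 (k ++ PySem.Int.toStr q.1))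
            (PySem.List.pySetD out i0 k)) out).getD i ""
        = if xs.getD i "" ∈ ks then dec (xs.getD i "") ((xs.take i).count (xs.getD i ""))
          else out.getD i "" := by
  intro ks
  induction ks with
  | nil => intro out hlen _; exact ⟨hlen, fun i _ => by simp⟩
  | cons kk ks ih =>
    intro out hlen hmem
    have hkk : kk ∈ xs := hmem kk (by simp)
    obtain ⟨m0, ms, hocc⟩ : ∃ m0 ms, occ xs kk = m0 :: ms := by
      cases h : occ xs kk with
      | nil => exact absurd h (occ_ne_nil xs kk hkk)
      | cons a b => exact ⟨a, b, rfl⟩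
    rw [List.foldl_cons]
    simp only [hocc, List.map_cons]
    have h0 := occ_getElem? xs kk 0 m0 (by simp [hocc])
    have hset : PySem.List.pySetD out (Int.ofNat m0) kk = out.set m0 kk := by
      simp [PySem.List.pySetD_natCast]
    rw [hset]
    have htf := tailFold xs kk ms 1 (out.set m0 kk) (le_refl 1) (by simp [hlen])
      (fun j m hj => by
        have := occ_getElem? xs kk (j + 1) m (by simp [hocc, hj])
        exact ⟨this.1, this.2.1, this.2.2.trans (by omega)⟩)
    set o2 := List.foldl (fun o q => PySem.List.pySetD o q.2 (kk ++ PySem.Int.toStr q.1)) (out.set m0 kk)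
        (PySem.List.enumerate (List.map (fun m => Int.ofNat m) ms) 1) with ho2
    have htfA : o2.length = xs.length := htf.1
    have htfB : ∀ i : Nat,
        (i ∈ ms → o2.getD i "" = dec (xs.getD i "") ((xs.take i).count (xs.getD i ""))) ∧
        (i ∉ ms → o2.getD i "" = (out.set m0 kk).getD i "") := fun i => htf.2 i
    have ihres := ih o2 htfA (fun k h => hmem k (List.mem_cons_of_mem _ h))
    refine ⟨ihres.1, fun i hi => ?_⟩
    rw [ihres.2 i hi]
    have hiff : (i ∈ occ xs kk) ↔ (xs.getD i "" = kk) := by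
      rw [occ_mem xs kk i]
      exact ⟨fun h => h.2, fun h => ⟨hi, h⟩⟩
    by_cases hks : xs.getD i "" ∈ ks
    · rw [if_pos hks, if_pos (List.mem_cons.mpr (Or.inr hks))]
    · rw [if_neg hks]
      by_cases hkk2 : xs.getD i "" = kk
      · rw [if_pos (List.mem_cons.mpr (Or.inl hkk2))]
        have hio : i ∈ m0 :: ms := hocc ▸ hiff.mpr hkk2
        by_cases hims : i ∈ ms
        · exact (htfB i).1 hims
        · have hi0 : i = m0 := by
            rcases List.mem_cons.mp hio with h | h
            · exact h
            · exact absurd h hims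
          subst hi0
          rw [(htfB i).2 hims]
          have hval : (out.set i kk).getD i "" = kk := by
            rw [List.getD_eq_getElem?_getD, List.getElem?_set_self (by rw [hlen]; exact hi)]
            rfl
          rw [hval, hkk2, h0.2.2]
          simp [dec]
      · rw [if_neg (fun h => (List.mem_cons.mp h).elim hkk2 hks)]
        have hio : i ∉ m0 :: ms := fun h => hkk2 (hiff.mp (hocc ▸ h))
        have hims : i ∉ ms := fun h => hio (List.mem_cons_of_mem _ h)
        have hine : i ≠ m0 := fun h => hio (h ▸ List.mem_cons_self)
        rw [(htfB i).2 hims, List.getD_eq_getElem?_getD,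
          List.getElem?_set_ne (fun h => hine h.symm), ← List.getD_eq_getElem?_getD]


-- ===== VERDICT (by name: the statement is the Claim_ definition above) =====
theorem deviceNamesSystem2_spec : Claim_equal_deviceNamesSystem2 := by
  intro xs _
  unfold Spec_deviceNamesSystem2
  have hA : deviceNamesSystem2 xs = dnGo [] xs := by
    unfold deviceNamesSystem2
    rw [dnGo_a xs [] PySem.Dict.empty [] (by intro d; simp [PySem.Dict.get?_empty])]
    simp
  have hBeq : deviceNamesSystem2_alt xs
      = (PySem.Set.ofList xs).foldl
          (fun out k =>
            match (occ xs k).map (fun m => Int.ofNat m) with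
            | [] => out
            | i0 :: rest => (PySem.List.enumerate rest 1).foldl
                (fun o q => PySem.List.pySetD o q.2 (k ++ PySem.Int.toStr q.1))
                (PySem.List.pySetD out i0 k))
          (List.replicate xs.length "") := by
    show (dnPositions xs).items.foldl
        (fun out p => match p.2 with
          | [] => out
          | i0 :: rest =>
            (PySem.List.enumerate rest 1).foldl
              (fun o q => PySem.List.pySetD o q.2 (p.1 ++ PySem.Int.toStr q.1))
              (PySem.List.pySetD out i0 p.1))
        (List.replicate xs.length "") = _
    rw [dnPositions_items xs, List.foldl_map]
  have hG := foldGroups xs (PySem.Set.ofList xs) (List.replicate xs.length "")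
    (by simp) (fun k h => (PySem.Set.mem_ofList _ _).mp h)
  have hAlen : (deviceNamesSystem2 xs).length = xs.length := by rw [hA, dnGo_length]
  have hBlen : (deviceNamesSystem2_alt xs).length = xs.length := by rw [hBeq]; exact hG.1
  apply List.ext_getElem (by rw [hAlen, hBlen])
  intro i h1 h2
  have hi : i < xs.length := by rw [hAlen] at h1; exact h1
  have hAget : (deviceNamesSystem2 xs).getD i ""
      = dec (xs.getD i "") ((xs.take i).count (xs.getD i "")) := by
    rw [hA, dnGo_getD xs [] i hi]
    simp
  have hBget : (deviceNamesSystem2_alt xs).getD i ""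
      = dec (xs.getD i "") ((xs.take i).count (xs.getD i "")) := by
    rw [hBeq, hG.2 i hi, if_pos]
    exact (PySem.Set.mem_ofList _ _).mpr (by
      rw [List.getD_eq_getElem _ _ hi]
      exact List.getElem_mem hi)
  rw [← List.getD_eq_getElem _ "" h1, ← List.getD_eq_getElem _ "" h2, hAget, hBget]
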